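-- pv_equiv track=rewrite | github.com/nicfro/advent_of_code2021 | day20/solution.py | pad_image
-- ===== SOURCE A (Python) =====
-- def pad_image(image, step):
--     if step % 2 == 0:
--         padder = "0"
--     else:
--         padder = "1"
--     columns = list(zip(*image))
--     pads = []
--     pad = 0
--     for i in image[0:3]:
--         if sum([int(x) for x in i]) > 0:
--             pad += 1
--     pads.append(pad)
--
--     pad = 0
--     for i in image[len(image)-3:len(image)]:
--         if sum([int(x) for x in i]) > 0:
--             pad += 1
--     pads.append(pad)
--
--     pad = 0
--     for i in columns[0:3]:
--         if sum([int(x) for x in i]) > 0: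
--             pad += 1
--     pads.append(pad)
--
--     pad = 0
--     for i in columns[len(columns)-3:len(columns)]:
--         if sum([int(x) for x in i]) > 0:
--             pad += 1
--     pads.append(pad)
--     padding = max(pads)
--
--     if padding > 0:
--         image_len = len(image[0])+(padding*2)
--         res = [[padder]*image_len]
--         for i in range(padding-1):
--             res.append([padder]*image_len)
--         res.extend([[padder]*padding+x+[padder]*padding for x in image])
--         for i in range(padding):
--             res.append([padder]*image_len)
--         return res
--     else:
--         return image
-- ===== SOURCE B (Python) =====
-- def pad_image(image, step):
--     padder = "1" if step % 2 else "0"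
--     w = len(image[0]) if image else 0
--     col_sums = [0] * w
--     row_sums = []
--     for row in image:
--         vals = [int(x) for x in row]
--         row_sums.append(sum(vals))
--         col_sums = [a + b for a, b in zip(col_sums, vals)]
--
--     def edge(sums):
--         return max(sum(s > 0 for s in sums[:3]), sum(s > 0 for s in sums[-3:]))
--
--     grid = image
--     for _ in range(max(edge(row_sums), edge(col_sums))):
--         width = len(grid[0]) + 2
--         grid = [[padder] * width] + [[padder] + r + [padder] for r in grid] + [[padder] * width]
--     return grid
-- ===== Notes on version B (the rewrite author's own statement) =====
-- stated objective: alternative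
-- what changed: B replaces A's transpose-plus-four-slice-loops with a single pass over the rows that accumulates row sums and column sums together, and instead of concatenating precomputed padder rows it grows the padded grid ring by ring (one padder layer per iteration).
-- outside the precondition, e.g. on pad_image([['0', '0'], ['0']], 2): A returns [['0', '0'], ['0']], B returns [['0', '0'], ['0']]
import Mathlib
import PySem

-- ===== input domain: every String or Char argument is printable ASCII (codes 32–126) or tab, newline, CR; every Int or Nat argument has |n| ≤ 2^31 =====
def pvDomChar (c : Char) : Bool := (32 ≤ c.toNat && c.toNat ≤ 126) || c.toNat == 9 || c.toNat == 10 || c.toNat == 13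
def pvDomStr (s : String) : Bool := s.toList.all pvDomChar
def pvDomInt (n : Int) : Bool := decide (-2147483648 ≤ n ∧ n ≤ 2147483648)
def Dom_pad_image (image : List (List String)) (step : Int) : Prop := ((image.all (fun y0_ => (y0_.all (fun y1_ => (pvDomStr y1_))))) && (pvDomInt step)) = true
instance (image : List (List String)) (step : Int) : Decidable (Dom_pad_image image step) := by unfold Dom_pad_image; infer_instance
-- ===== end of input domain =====

-- B replaces A's transpose-plus-four-slice-loops with ONE pass over the rows that accumulates the
-- row sums and the column sums together, and grows the padded grid ring by ring instead of
-- concatenating precomputed padder rows (objective: alternative).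

-- ===== PORT A =====
-- int(x); Pre_ guarantees every parsed cell is int-parseable, so the default is never used
def pvInt (x : String) : Int := (PySem.Int.ofStr? x).getD 0
-- sum([int(x) for x in i])
def pvRowSum (row : List String) : Int := (row.map pvInt).sum
-- hand port of zip(*image): one list per index below the minimum row length; exact for list-of-lists arguments
def pvZipStar (image : List (List String)) : List (List String) :=
  match image with
  | [] => []
  | r0 :: _ => (List.range (image.foldl (fun m row => min m row.length) r0.length)).map
      (fun c => image.map (fun row => row.getD c ""))

def pad_image (image : List (List String)) (step : Int) : List (List String) :=
  let padder := if PySem.Int.mod step 2 = 0 then "0" else "1"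
  let columns := pvZipStar image
  let pad1 := (PySem.List.slice image (some 0) (some 3)).foldl
      (fun pad i => if pvRowSum i > 0 then pad + 1 else pad) (0 : Int)
  let pad2 := (PySem.List.slice image (some (PySem.List.len image - 3)) (some (PySem.List.len image))).foldl
      (fun pad i => if pvRowSum i > 0 then pad + 1 else pad) (0 : Int)
  let pad3 := (PySem.List.slice columns (some 0) (some 3)).foldl
      (fun pad i => if pvRowSum i > 0 then pad + 1 else pad) (0 : Int)
  let pad4 := (PySem.List.slice columns (some (PySem.List.len columns - 3)) (some (PySem.List.len columns))).foldl
      (fun pad i => if pvRowSum i > 0 then pad + 1 else pad) (0 : Int)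
  let pads : List Int := [pad1, pad2, pad3, pad4]
  let padding := (PySem.List.max? pads (fun x => x)).getD 0
  if padding > 0 then
    -- len(image[0]): image is nonempty whenever padding > 0, so headD is exact here
    let image_len := PySem.List.len (image.headD []) + padding * 2
    let padrow := PySem.List.pyRepeat [padder] image_len
    let res := (PySem.List.pyRange 0 (padding - 1) 1).foldl (fun res _ => res ++ [padrow]) [padrow]
    let res := res ++ image.map (fun x =>
        PySem.List.pyRepeat [padder] padding ++ x ++ PySem.List.pyRepeat [padder] padding)
    (PySem.List.pyRange 0 padding 1).foldl (fun res _ => res ++ [padrow]) res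
  else image

-- ===== PORT B =====
def pvPos (s : Int) : Bool := decide (0 < s)

-- max(sum(s > 0 for s in sums[:3]), sum(s > 0 for s in sums[-3:]));
-- sums[-3:] = drop (length - 3), exact since Nat subtraction clamps at 0 like Python's negative-start clamp
def pvEdge (sums : List Int) : Nat :=
  max ((sums.take 3).countP pvPos) ((sums.drop (sums.length - 3)).countP pvPos)

-- one ring: grid is nonempty whenever this is reached, so headD is exact here
def pvRing (padder : String) (grid : List (List String)) : List (List String) :=
  let width := (grid.headD []).length + 2
  [List.replicate width padder] ++ grid.map (fun r => [padder] ++ r ++ [padder])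
    ++ [List.replicate width padder]

def pad_image_alt (image : List (List String)) (step : Int) : List (List String) :=
  let padder := if PySem.Int.mod step 2 ≠ 0 then "1" else "0"
  let w := if image.isEmpty then 0 else (image.headD []).length
  -- one pass: (col_sums, row_sums) accumulated together
  let st := image.foldl (fun (st : List Int × List Int) row =>
      let vals := row.map pvInt
      (List.zipWith (· + ·) st.1 vals, st.2 ++ [vals.sum]))
    (List.replicate w (0 : Int), ([] : List Int))
  let p := max (pvEdge st.2) (pvEdge st.1)
  -- grow the grid ring by ring
  (List.range p).foldl (fun grid _ => pvRing padder grid) image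

-- ===== PRECONDITION & SPEC =====
-- Pre_ excludes ragged images (zip(*image) silently truncates, so A's column counts and output
-- shape are accidents of raggedness, a shape outside the natural image domain) and images whose
-- cells do not all parse as Python ints (A raises ValueError on the edge cells it parses; the
-- all-cells requirement also drops grids whose only unparseable cells A never reads — ragged
-- short rows or the interior of a ≥ 7×7 grid — where B's single full pass raises instead).
def Pre_pad_image (image : List (List String)) (step : Int) : Prop :=
  (∀ row ∈ image, row.length = (image.headD []).length) ∧
  (∀ row ∈ image, ∀ x ∈ row, (PySem.Int.ofStr? x).isSome)
instance (image : List (List String)) (step : Int) : Decidable (Pre_pad_image image step) := by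
  unfold Pre_pad_image; infer_instance

def pvWitness_pad_image : List (List String) × Int := ([["1", "0"], ["0", "0"]], 3)

def Spec_pad_image (image : List (List String)) (step : Int) (out : List (List String)) : Prop :=
  out = pad_image_alt image step
instance (image : List (List String)) (step : Int) (out : List (List String)) :
    Decidable (Spec_pad_image image step out) := by unfold Spec_pad_image; infer_instance

-- ===== CLAIM (what is proved, stated in full; the proofs are below) =====
def Claim_equal_pad_image : Prop := ∀ (image : List (List String)) (step : Int),
  Dom_pad_image image step → Pre_pad_image image step →
  Spec_pad_image image step (pad_image image step)

-- ===== LEMMAS AND PROOFS =====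

theorem pv_foldl_count {α : Type} (l : List α) (f : α → Int) :
    l.foldl (fun pad i => if f i > 0 then pad + 1 else pad) (0 : Int)
      = ((l.countP (fun i => pvPos (f i)) : Nat) : Int) := by
  rw [PySem.List.foldl_ite_add_one]
  simp [pvPos]

theorem pv_slice03 {α : Type} (xs : List α) :
    PySem.List.slice xs (some 0) (some 3) = xs.take 3 := by
  rw [PySem.List.slice_zero_start, PySem.List.slice_to xs (by omega)]
  rfl

theorem pv_map_getD_range {α : Type} (l : List α) (d : α) :
    (List.range l.length).map (fun j => l.getD j d) = l := by
  apply List.ext_getElem (by simp)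
  intro i h1 h2
  simp [List.getD_eq_getElem?_getD, List.getElem?_eq_getElem h2]

theorem pv_foldl_min_const {α : Type} (l : List α) (f : α → Nat) (w : Nat)
    (h : ∀ x ∈ l, f x = w) : l.foldl (fun m x => min m (f x)) w = w := by
  induction l with
  | nil => rfl
  | cons x t ih =>
    simp only [List.foldl_cons, h x (by simp)]
    rw [Nat.min_self]
    exact ih (fun y hy => h y (by simp [hy]))

theorem pv_sliceLast3 {α : Type} (xs : List α) :
    ∃ k : Nat, PySem.List.slice xs (some ((xs.length : Int) - 3)) (some (xs.length : Int))
      = xs.drop k ∧ (3 ≤ xs.length → k = xs.length - 3) := by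
  rcases Nat.lt_or_ge xs.length 3 with h | h
  · match xs, h with
    | [], _ => exact ⟨0, by simp [PySem.List.slice, PySem.List.clampIdx], by omega⟩
    | [a], _ => exact ⟨0, by simp [PySem.List.slice, PySem.List.clampIdx], by omega⟩
    | [a,b], _ => exact ⟨1, by simp [PySem.List.slice, PySem.List.clampIdx], by omega⟩
  · refine ⟨xs.length - 3, ?_, fun _ => rfl⟩
    have h3 : ((xs.length : Int) - 3) = ((xs.length - 3 : Nat) : Int) := by omega
    rw [h3, PySem.List.slice_natCast]
    exact List.take_of_length_le (by simp)

theorem pv_edge_eq {α : Type} (L : List α) (f : α → Int) :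
    max ((PySem.List.slice L (some 0) (some 3)).foldl
          (fun pad i => if f i > 0 then pad + 1 else pad) (0 : Int))
        ((PySem.List.slice L (some ((L.length : Int) - 3)) (some (L.length : Int))).foldl
          (fun pad i => if f i > 0 then pad + 1 else pad) (0 : Int))
      = ((pvEdge (L.map f) : Nat) : Int) := by
  obtain ⟨k, hk, hk3⟩ := pv_sliceLast3 L
  rw [pv_slice03, hk, pv_foldl_count, pv_foldl_count]
  unfold pvEdge
  rw [← List.map_take, ← List.map_drop, List.countP_map, List.countP_map, List.length_map]
  rcases Nat.lt_or_ge L.length 3 with h | h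
  · have ht : L.take 3 = L := List.take_of_length_le (by omega)
    have hd : L.drop (L.length - 3) = L := by
      have : L.length - 3 = 0 := by omega
      rw [this]; rfl
    have hle : (L.drop k).countP (fun i => pvPos (f i)) ≤ L.countP (fun i => pvPos (f i)) :=
      (List.drop_sublist k L).countP_le
    rw [ht, hd]
    simp only [Function.comp_def]
    omega
  · rw [hk3 h]
    simp only [Function.comp_def]
    push_cast [Nat.cast_max]
    omega

-- columns of a rectangular image, read by index
theorem pv_cols_eq (r0 : List String) (rest : List (List String))
    (hrect : ∀ row ∈ r0 :: rest, row.length = r0.length) :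
    pvZipStar (r0 :: rest)
      = (List.range r0.length).map (fun c => (r0 :: rest).map (fun row => row.getD c "")) := by
  show (List.range ((r0 :: rest).foldl (fun m row => min m row.length) r0.length)).map
      (fun c => (r0 :: rest).map (fun row => row.getD c "")) = _
  rw [pv_foldl_min_const (r0 :: rest) List.length r0.length (by
    intro x hx; exact hrect x hx)]

-- A's max over the four edge counts = B's max of the two pvEdge counts
theorem pv_max4_eq (rows cols : List (List String)) :
    (PySem.List.max? [
      (PySem.List.slice rows (some 0) (some 3)).foldl
        (fun pad i => if pvRowSum i > 0 then pad + 1 else pad) (0 : Int),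
      (PySem.List.slice rows (some ((rows.length : Int) - 3)) (some (rows.length : Int))).foldl
        (fun pad i => if pvRowSum i > 0 then pad + 1 else pad) (0 : Int),
      (PySem.List.slice cols (some 0) (some 3)).foldl
        (fun pad i => if pvRowSum i > 0 then pad + 1 else pad) (0 : Int),
      (PySem.List.slice cols (some ((cols.length : Int) - 3)) (some (cols.length : Int))).foldl
        (fun pad i => if pvRowSum i > 0 then pad + 1 else pad) (0 : Int)] (fun x => x)).getD 0
      = ((max (pvEdge (rows.map pvRowSum)) (pvEdge (cols.map pvRowSum)) : Nat) : Int) := by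
  rw [PySem.List.max?_id_cons]
  simp only [List.foldl_cons, List.foldl_nil, Option.getD_some]
  have h1 := pv_edge_eq rows pvRowSum
  have h2 := pv_edge_eq cols pvRowSum
  rw [Nat.cast_max]
  omega

-- the single accumulating pass splits into a column fold and the list of row sums
theorem pv_fold_pair (image : List (List String)) (col acc : List Int) :
    image.foldl (fun (st : List Int × List Int) row =>
        let vals := row.map pvInt
        (List.zipWith (· + ·) st.1 vals, st.2 ++ [vals.sum])) (col, acc)
      = (image.foldl (fun c row => List.zipWith (· + ·) c (row.map pvInt)) col,
         acc ++ image.map pvRowSum) := by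
  induction image generalizing col acc with
  | nil => simp
  | cons r rest ih => simp [ih, pvRowSum]

-- the accumulated column sums, read off index by index
theorem pv_colfold (image : List (List String)) (w : Nat) (col : List Int)
    (hw : ∀ row ∈ image, row.length = w) (hc : col.length = w) :
    image.foldl (fun c row => List.zipWith (· + ·) c (row.map pvInt)) col
      = (List.range w).map (fun c =>
          col.getD c 0 + (image.map (fun row => pvInt (row.getD c ""))).sum) := by
  induction image generalizing col with
  | nil =>
    simp only [List.foldl_nil, List.map_nil, List.sum_nil, add_zero]
    rw [← hc, pv_map_getD_range]
  | cons r rest ih =>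
    have hr : r.length = w := hw r (by simp)
    have hlen : (List.zipWith (· + ·) col (r.map pvInt)).length = w := by
      simp [hc, hr]
    rw [List.foldl_cons, ih (List.zipWith (· + ·) col (r.map pvInt))
      (fun row hrow => hw row (List.mem_cons_of_mem _ hrow)) hlen]
    apply List.map_congr_left
    intro c hcmem
    have hcw : c < w := List.mem_range.mp hcmem
    have h1 : (List.zipWith (· + ·) col (r.map pvInt)).getD c 0
        = col.getD c 0 + pvInt (r.getD c "") := by
      have hcc : c < col.length := by omega
      have hcr : c < r.length := by omega
      rw [List.getD_eq_getElem?_getD, List.getElem?_zipWith,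
        List.getElem?_eq_getElem hcc, List.getElem?_eq_getElem (by simpa using hcr)]
      simp [List.getD_eq_getElem?_getD, List.getElem?_eq_getElem hcc,
        List.getElem?_eq_getElem hcr]
    rw [h1]
    simp only [List.map_cons, List.sum_cons]
    ring

-- growing ring by ring p times = p padder layers on every side
theorem pv_ring_iter (padder : String) (p : Nat) (img : List (List String)) (w : Nat)
    (hne : img ≠ []) (hw : ∀ row ∈ img, row.length = w) :
    (List.range p).foldl (fun grid _ => pvRing padder grid) img
      = List.replicate p (List.replicate (w + 2 * p) padder)
        ++ img.map (fun x => List.replicate p padder ++ x ++ List.replicate p padder)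
        ++ List.replicate p (List.replicate (w + 2 * p) padder) := by
  induction p with
  | zero => simp
  | succ q ih =>
    rw [List.range_succ, List.foldl_append, ih]
    simp only [List.foldl_cons, List.foldl_nil]
    have hhead : ((List.replicate q (List.replicate (w + 2 * q) padder)
        ++ img.map (fun x => List.replicate q padder ++ x ++ List.replicate q padder)
        ++ List.replicate q (List.replicate (w + 2 * q) padder)).headD []).length
        = w + 2 * q := by
      cases q with
      | zero =>
        match img, hne with
        | r :: rest, _ => simp [hw r (by simp)]
      | succ m => simp [List.replicate_succ]
    unfold pvRing
    rw [hhead]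
    have e : w + 2 * (q + 1) = w + 2 * q + 2 := by omega
    rw [e]
    simp only [List.map_append, List.map_replicate, List.map_map, Function.comp_def]
    have hgen : ∀ {α : Type} (n : Nat) (a : α),
        List.replicate n a ++ [a] = a :: List.replicate n a := fun n a => by
      rw [← List.replicate_succ', ← List.replicate_succ]
    have hfX : [padder] ++ List.replicate (w + 2 * q) padder ++ [padder]
        = List.replicate (w + 2 * q + 2) padder := by
      rw [List.append_assoc, hgen, List.singleton_append, ← List.replicate_succ,
        ← List.replicate_succ]
    rw [hfX]
    rw [List.map_congr_left (l := img) (f := fun x =>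
        [padder] ++ (List.replicate q padder ++ x ++ List.replicate q padder) ++ [padder])
      (g := fun x => List.replicate (q + 1) padder ++ x ++ List.replicate (q + 1) padder)
      (fun x _ => by simp [List.replicate_succ, List.append_assoc, hgen])]
    simp [List.replicate_succ, List.append_assoc, hgen]

-- ===== VERDICT (by name: the statement is the Claim_ definition above) =====
theorem pad_image_spec : Claim_equal_pad_image := by
  intro image step hdom hpre
  obtain ⟨hrect, _⟩ := hpre
  unfold Spec_pad_image pad_image pad_image_alt
  simp only [PySem.List.len_eq]
  have hpad : (if PySem.Int.mod step 2 = 0 then "0" else "1")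
      = (if PySem.Int.mod step 2 ≠ 0 then "1" else "0") := by
    by_cases h : PySem.Int.mod step 2 = 0
    · rw [if_pos h, if_neg (not_not_intro h)]
    · rw [if_neg h, if_pos h]
  rw [← hpad]
  set padder := if PySem.Int.mod step 2 = 0 then "0" else "1" with hpadder
  match image, hrect with
  | [], _ =>
    simp [pvZipStar, pvEdge, PySem.List.slice, PySem.List.clampIdx, PySem.List.max?]
  | r0 :: rest, hrect =>
    have hw : ∀ row ∈ r0 :: rest, row.length = r0.length := by
      simpa using hrect
    rw [pv_cols_eq r0 rest hw, pv_max4_eq]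
    have hwif : (if (r0 :: rest).isEmpty then 0 else ((r0 :: rest).headD []).length)
        = r0.length := by simp
    rw [hwif, pv_fold_pair]
    dsimp only
    rw [List.nil_append,
      pv_colfold (r0 :: rest) r0.length (List.replicate r0.length 0) hw (by simp)]
    have hhead : ((r0 :: rest).headD []).length = r0.length := by simp
    rw [hhead]
    have hcolsum : List.map pvRowSum
        ((List.range r0.length).map (fun c => (r0 :: rest).map (fun row => row.getD c "")))
        = (List.range r0.length).map
            (fun c => List.getD (List.replicate r0.length (0:Int)) c 0
              + ((r0 :: rest).map (fun row => pvInt (row.getD c ""))).sum) := by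
      rw [List.map_map]
      apply List.map_congr_left
      intro c hc
      have : c < r0.length := List.mem_range.mp hc
      simp [pvRowSum, List.map_map, Function.comp_def, List.getD_eq_getElem?_getD,
        List.getElem?_eq_getElem (by simpa using this : c < (List.replicate r0.length (0:Int)).length)]
    rw [hcolsum]
    generalize hpdef : max (pvEdge (List.map pvRowSum (r0 :: rest)))
      (pvEdge ((List.range r0.length).map
        (fun c => List.getD (List.replicate r0.length (0:Int)) c 0
          + ((r0 :: rest).map (fun row => pvInt (row.getD c ""))).sum))) = p
    by_cases hp0 : p = 0
    · subst hp0
      norm_num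
    · rw [if_pos (by exact_mod_cast Nat.pos_of_ne_zero hp0)]
      rw [PySem.List.foldl_append_singleton_eq_map, PySem.List.foldl_append_singleton_eq_map]
      simp only [List.map_const', PySem.List.length_pyRange_one, PySem.List.pyRepeat_singleton]
      have e1 : ((p : Int) - 1 - 0).toNat = p - 1 := by omega
      have e3 : ((r0.length : Int) + (p : Int) * 2).toNat = r0.length + 2 * p := by omega
      have e4 : ((p : Int)).toNat = p := by omega
      rw [e1, e3, e4, show ((p : Int) - 0).toNat = p from by omega,
        List.singleton_append,
        show ((List.replicate (r0.length + 2 * p) padder) :: List.replicate (p - 1)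
            (List.replicate (r0.length + 2 * p) padder)
          = List.replicate p (List.replicate (r0.length + 2 * p) padder)) from by
          rw [← List.replicate_succ]; congr 1; omega]
      rw [pv_ring_iter padder p (r0 :: rest) r0.length (by simp) hw]
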